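-- pv_equiv track=rewrite | github.com/Daishijun/InterviewAlgorithmCoding | ZuoShenBook/otherQuestions/Manacher.py | manacherString
-- ===== SOURCE A (Python) =====
-- def manacherString(string):
--     res = ['' for i in range(len(string)*2+1)]
--     index = 0
--     for i in range(len(res)):
--         if i &1:
--             res[i] = string[index]
--             index +=1
--         else:
--             res[i] = '#'
--     return res
-- ===== SOURCE B (Python) =====
-- def manacherString(string):
--     res = ['#']
--     for c in string:
--         res.append(c)
--         res.append('#')
--     return res
-- ===== Notes on version B (the rewrite author's own statement) =====
-- stated objective: idiomatic
-- what changed: Iterates over the n input characters appending (char, '#') pairs to a seed ['#'], instead of preallocating a 2n+1 slot list and filling it by an index loop with a parity test and a manual counter.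
import Mathlib
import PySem

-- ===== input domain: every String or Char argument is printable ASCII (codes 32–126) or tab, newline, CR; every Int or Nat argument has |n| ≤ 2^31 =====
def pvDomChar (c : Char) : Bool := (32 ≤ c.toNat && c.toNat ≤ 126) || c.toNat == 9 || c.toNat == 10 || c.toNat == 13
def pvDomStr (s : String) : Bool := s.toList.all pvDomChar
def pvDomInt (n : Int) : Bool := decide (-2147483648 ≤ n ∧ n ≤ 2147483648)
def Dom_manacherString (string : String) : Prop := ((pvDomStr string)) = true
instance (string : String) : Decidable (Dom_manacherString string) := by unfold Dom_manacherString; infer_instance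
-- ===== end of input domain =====

-- B builds the interleaved list by appending (char, '#') pairs to ['#'] while walking the
-- input characters, instead of A's index loop over 2n+1 preallocated slots with a parity
-- test and a manual character counter.

-- ===== PORT A =====
-- A's loop body: res[i] = string[index] on odd i (incrementing index), res[i] = '#' on even i.
def pvStepA (s : String) (st : List String × Int) (i : Int) : List String × Int :=
  if PySem.Int.band i 1 ≠ 0 then
    -- res[i] = string[index]; index is always in range when this branch runs, so pyGet? is some
    (PySem.List.pySetD st.1 i
      (match PySem.Str.pyGet? s st.2 with
       | some c => String.ofList [c]
       | none => ""), st.2 + 1)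
  else
    (PySem.List.pySetD st.1 i "#", st.2)

def manacherString (string : String) : List String :=
  let res : List String := (PySem.List.pyRange 0 (PySem.Str.len string * 2 + 1) 1).map (fun _ => "")
  let fin := (PySem.List.pyRange 0 (res.length : Int) 1).foldl (pvStepA string) (res, 0)
  fin.1

-- ===== PORT B =====
def manacherString_alt (string : String) : List String :=
  string.toList.foldl (fun acc c => acc ++ [String.ofList [c], "#"]) ["#"]

-- ===== PRECONDITION & SPEC =====
def Spec_manacherString (string : String) (out : List String) : Prop := out = manacherString_alt string
instance (string : String) (out : List String) : Decidable (Spec_manacherString string out) := by unfold Spec_manacherString; infer_instance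

-- ===== CLAIM (what is proved, stated in full; the proofs are below) =====
def Claim_equal_manacherString : Prop := ∀ (string : String), Dom_manacherString string → Spec_manacherString string (manacherString string)

-- ===== LEMMAS AND PROOFS =====

/-- The '#'-interleaving of a character list: both programs compute this. -/
def pvWeave : List Char → List String
  | [] => ["#"]
  | c :: cs => "#" :: String.ofList [c] :: pvWeave cs

theorem pvWeave_length (l : List Char) : (pvWeave l).length = 2 * l.length + 1 := by
  induction l with
  | nil => rfl
  | cons c cs ih => simp [pvWeave, ih]; omega

theorem pvWeave_append_singleton (l : List Char) (c : Char) :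
    pvWeave (l ++ [c]) = pvWeave l ++ [String.ofList [c], "#"] := by
  induction l with
  | nil => rfl
  | cons d ds ih => simp [pvWeave, ih]

theorem alt_foldl (l : List Char) (acc : List String) :
    l.foldl (fun acc c => acc ++ [String.ofList [c], "#"]) acc
      = acc ++ l.flatMap (fun c => [String.ofList [c], "#"]) := by
  induction l generalizing acc with
  | nil => simp
  | cons c cs ih => simp [List.foldl_cons, ih]

theorem pvWeave_eq_flatMap (l : List Char) :
    pvWeave l = "#" :: l.flatMap (fun c => [String.ofList [c], "#"]) := by
  induction l with
  | nil => rfl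
  | cons c cs ih => simp [pvWeave, ih]

theorem alt_eq_pvWeave (s : String) : manacherString_alt s = pvWeave s.toList := by
  rw [manacherString_alt, alt_foldl, pvWeave_eq_flatMap]; rfl

/-- Invariant of A's loop from position 2j+1 on. -/
theorem loopA (s : String) : ∀ (m j : Nat), j + m = s.toList.length →
    (PySem.List.pyRange (2*(j:Int)+1) (2*(s.toList.length:Int)+1) 1).foldl (pvStepA s)
        (pvWeave (s.toList.take j) ++ List.replicate (2*m) "", (j:Int))
      = (pvWeave s.toList, (s.toList.length : Int)) := by
  intro m
  induction m with
  | zero =>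
    intro j hj
    rw [PySem.List.pyRange_one_eq_nil (by omega)]
    have ht : s.toList.take j = s.toList := List.take_of_length_le (by omega)
    have hl : s.toList.length = s.length := by simp
    simp [ht]
    omega
  | succ m ih =>
    intro j hj
    have hjlt : j < s.toList.length := by omega
    rw [PySem.List.pyRange_one_cons (by omega),
        PySem.List.pyRange_one_cons (by omega),
        List.foldl_cons, List.foldl_cons]
    have hodd : PySem.Int.band (2*(j:Int)+1) 1 ≠ 0 := by
      rw [PySem.Int.band_one]
      have h' : PySem.Int.mod (2*(j:Int)+1) 2 = ((2*j+1) % 2 : Nat) := by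
        exact_mod_cast PySem.Int.mod_natCast (2*j+1) 2
      rw [h']; omega
    have heven : PySem.Int.band (2*(j:Int)+1+1) 1 = 0 := by
      rw [PySem.Int.band_one]
      have h' : PySem.Int.mod (2*(j:Int)+1+1) 2 = ((2*j+2) % 2 : Nat) := by
        exact_mod_cast PySem.Int.mod_natCast (2*j+2) 2
      rw [h']; omega
    have hget : PySem.Str.pyGet? s (j:Int) = some (s.toList[j]'hjlt) := by
      simp [List.getElem?_eq_getElem hjlt]
    have hwl : (pvWeave (s.toList.take j)).length = 2*j+1 := by
      rw [pvWeave_length, List.length_take]; omega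
    set W := pvWeave (s.toList.take j) with hW
    set cj := String.ofList [s.toList[j]'hjlt] with hcj
    -- evaluate the two peeled steps
    have hstep1 : pvStepA s (W ++ List.replicate (2*(m+1)) "", (j:Int)) (2*(j:Int)+1)
        = (W ++ cj :: "" :: List.replicate (2*m) "", (j:Int)+1) := by
      rw [pvStepA]
      dsimp only
      rw [if_pos hodd]
      simp only [hget]
      have hidx : (2*(j:Int)+1) = ((2*j+1 : Nat) : Int) := by push_cast; ring
      rw [hidx, PySem.List.pySetD_natCast, List.set_append, if_neg (by omega)]
      have hz : 2*j+1 - W.length = 0 := by omega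
      have h2 : 2*(m+1) = (2*m+1)+1 := by omega
      rw [hz, h2, List.replicate_succ, List.replicate_succ, List.set_cons_zero, ← hcj]
    have hstep2 : pvStepA s (W ++ cj :: "" :: List.replicate (2*m) "", (j:Int)+1) (2*(j:Int)+1+1)
        = (W ++ cj :: "#" :: List.replicate (2*m) "", (j:Int)+1) := by
      rw [pvStepA]
      dsimp only
      rw [if_neg (by simp [heven])]
      have hidx : (2*(j:Int)+1+1) = ((2*j+2 : Nat) : Int) := by push_cast; ring
      rw [hidx, PySem.List.pySetD_natCast, List.set_append, if_neg (by omega)]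
      have hz : 2*j+2 - W.length = 1 := by omega
      rw [hz]
      simp
    rw [hstep1, hstep2]
    have hnext : W ++ cj :: "#" :: List.replicate (2*m) ""
        = pvWeave (s.toList.take (j+1)) ++ List.replicate (2*m) "" := by
      have htake : s.toList.take (j+1) = s.toList.take j ++ [s.toList[j]'hjlt] := by
        rw [List.take_succ]
        simp [List.getElem?_eq_getElem hjlt]
      rw [htake, pvWeave_append_singleton, ← hW, ← hcj]
      simp
    have hcast : ((j:Int)+1) = ((j+1 : Nat) : Int) := by push_cast; ring
    have hstart : 2*(j:Int)+1+1+1 = 2*((j+1 : Nat) : Int)+1 := by push_cast; ring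
    rw [hnext, hcast, hstart]
    exact ih (j+1) (by omega)

theorem A_eq_pvWeave (s : String) : manacherString s = pvWeave s.toList := by
  rw [manacherString]
  have hres : (PySem.List.pyRange 0 (PySem.Str.len s * 2 + 1) 1).map (fun _ => ("" : String))
      = List.replicate (2*s.toList.length+1) "" := by
    rw [List.map_const']
    congr 1
    rw [PySem.List.length_pyRange_one, PySem.Str.len_eq]
    omega
  simp only [hres]
  rw [List.length_replicate]
  have hcast : ((2*s.toList.length+1 : Nat) : Int) = 2*(s.toList.length:Int)+1 := by push_cast; ring
  rw [hcast, PySem.List.pyRange_one_cons (by omega), List.foldl_cons]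
  have hstep0 : pvStepA s (List.replicate (2*s.toList.length+1) "", 0) 0
      = (pvWeave (s.toList.take 0) ++ List.replicate (2*s.toList.length) "", ((0:Nat):Int)) := by
    rw [pvStepA]
    dsimp only
    rw [if_neg (by simp only [ne_eq, Decidable.not_not]; decide)]
    rw [show (0:Int) = ((0:Nat):Int) from rfl, PySem.List.pySetD_natCast,
        List.replicate_succ, List.set_cons_zero]
    simp [pvWeave]
  rw [hstep0]
  have h1 : (0:Int)+1 = 2*((0:Nat):Int)+1 := by norm_num
  rw [h1]
  rw [loopA s s.toList.length 0 (by omega)]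

-- ===== VERDICT (by name: the statement is the Claim_ definition above) =====
theorem manacherString_spec : Claim_equal_manacherString := by
  intro s _
  unfold Spec_manacherString
  rw [A_eq_pvWeave, alt_eq_pvWeave]
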